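-- pv_equiv track=rewrite | github.com/kuroneko2539/advent | 2019/day4.py | checkAcceptable
-- ===== SOURCE A (Python) =====
-- def checkAcceptable(value, part):
--     twoNext = False
--     Asc = True
--     stringVal = str(value)
--     if part == 1:
--         for i in range(len(stringVal) - 1):
--             if stringVal[i] == stringVal[i+1]: twoNext = True
--             if int(stringVal[i]) > int(stringVal[i+1]): Asc = False
--     elif part == 2:
--         for i in range(len(stringVal) - 1):
--             if int(stringVal[i]) > int(stringVal[i+1]): Asc = False
--         setVal = set([x for x in stringVal])
--         for val in setVal:
--             if stringVal.count(val) == 2: twoNext = True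
--
--
--     if Asc and twoNext: return True
--     else: return False
-- ===== SOURCE B (Python) =====
-- def checkAcceptable(value, part):
--     if part != 1 and part != 2:
--         return False
--
--     def rle(cs):
--         # run-length encode: [(char, runlength), ...]
--         if not cs:
--             return []
--         j = 1
--         while j < len(cs) and cs[j] == cs[0]:
--             j += 1
--         return [(cs[0], j)] + rle(cs[j:])
--
--     groups = rle(str(value))
--     heads = [int(c) for c, _ in groups]
--     asc = all(a <= b for a, b in zip(heads, heads[1:]))
--     if part == 1:
--         return asc and any(n >= 2 for _, n in groups)
--     return asc and any(n == 2 for _, n in groups)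
-- ===== Notes on version B (the rewrite author's own statement) =====
-- stated objective: alternative
-- what changed: B run-length encodes the digit string once into (digit, runlength) groups and decides everything on the groups: ascending is checked on consecutive group heads only, part 1's repeated pair is 'some run length >= 2', and part 2's exactly-twice digit is 'some run length == 2' (correct because in a non-decreasing string each digit occupies one contiguous run), replacing A's index loop over all adjacent positions plus the set + repeated str.count scans.
import Mathlib
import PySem

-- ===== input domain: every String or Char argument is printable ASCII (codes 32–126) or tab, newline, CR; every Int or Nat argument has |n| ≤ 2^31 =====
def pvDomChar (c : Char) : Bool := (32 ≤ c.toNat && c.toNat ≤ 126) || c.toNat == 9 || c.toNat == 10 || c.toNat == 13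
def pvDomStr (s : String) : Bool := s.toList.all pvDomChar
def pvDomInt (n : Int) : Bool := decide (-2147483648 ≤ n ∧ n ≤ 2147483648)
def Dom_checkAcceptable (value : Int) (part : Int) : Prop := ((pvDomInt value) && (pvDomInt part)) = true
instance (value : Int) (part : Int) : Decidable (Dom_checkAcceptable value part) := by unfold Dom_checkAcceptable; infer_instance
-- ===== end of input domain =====

-- B run-length encodes the digit string once into (digit, runlength) groups and decides everything
-- on the groups (ascent on consecutive group heads; part 1: some run ≥ 2; part 2: some run = 2),
-- instead of A's indexed loop over all adjacent positions and (part 2) set + repeated str.count scans.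

-- int(c) for a single character; the ValueError case (none) is excluded by Pre_checkAcceptable
def pyDigit (c : Char) : Int := (PySem.Int.ofChars? [c]).getD 0

-- ===== PORT A =====
def checkAcceptable (value : Int) (part : Int) : Bool :=
  let stringVal := PySem.Int.toChars value
  let res : Bool × Bool :=          -- (twoNext, Asc)
    if part == 1 then
      (PySem.List.pyRange 0 ((stringVal.length : Int) - 1) 1).foldl
        (fun (st : Bool × Bool) i =>
          let st1 := if PySem.List.pyGetD stringVal i ' ' == PySem.List.pyGetD stringVal (i+1) ' '
                     then (true, st.2) else st
          if pyDigit (PySem.List.pyGetD stringVal i ' ') > pyDigit (PySem.List.pyGetD stringVal (i+1) ' ')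
          then (st1.1, false) else st1)
        (false, true)
    else if part == 2 then
      let asc := (PySem.List.pyRange 0 ((stringVal.length : Int) - 1) 1).foldl
        (fun (asc : Bool) i =>
          if pyDigit (PySem.List.pyGetD stringVal i ' ') > pyDigit (PySem.List.pyGetD stringVal (i+1) ' ')
          then false else asc) true
      let setVal := PySem.Set.ofList stringVal
      -- stringVal.count(val) for the single character val = character count (exact here)
      let twoNext := setVal.foldl
        (fun (two : Bool) val => if PySem.List.count stringVal val == 2 then true else two) false
      (twoNext, asc)
    else (false, true)
  if res.2 && res.1 then true else false

-- ===== PORT B =====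
-- run-length encoding of Source B's recursive rle helper (cs[j:] with j = 1 + run length inside cs)
def rleB : List Char → List (Char × Nat)
  | [] => []
  | c :: rest =>
    (c, (rest.takeWhile (fun x => x == c)).length + 1)
      :: rleB (rest.drop (rest.takeWhile (fun x => x == c)).length)
termination_by l => l.length
decreasing_by simp [List.length_drop]

def checkAcceptable_alt (value : Int) (part : Int) : Bool :=
  if part != 1 && part != 2 then false
  else
    let groups := rleB (PySem.Int.toChars value)
    let heads := groups.map (fun p => pyDigit p.1)
    let asc := (heads.zip (PySem.List.slice heads (some 1) none)).all (fun p => decide (p.1 ≤ p.2))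
    if part == 1 then asc && groups.any (fun p => decide (2 ≤ p.2))
    else asc && groups.any (fun p => p.2 == 2)

-- ===== PRECONDITION & SPEC =====
-- Pre_ excludes exactly the inputs where the Python A raises ValueError: for part 1 or 2 a
-- negative value puts '-' into the string and int('-') raises; everything else is admitted.
def Pre_checkAcceptable (value : Int) (part : Int) : Prop := (part = 1 ∨ part = 2) → 0 ≤ value
instance (value : Int) (part : Int) : Decidable (Pre_checkAcceptable value part) := by
  unfold Pre_checkAcceptable; infer_instance
def pvWitness_checkAcceptable : Int × Int := (122345, 2)

def Spec_checkAcceptable (value : Int) (part : Int) (out : Bool) : Prop := out = checkAcceptable_alt value part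
instance (value : Int) (part : Int) (out : Bool) : Decidable (Spec_checkAcceptable value part out) := by
  unfold Spec_checkAcceptable; infer_instance

-- ===== CLAIM (what is proved, stated in full; the proofs are below) =====
def Claim_equal_checkAcceptable : Prop := ∀ (value : Int) (part : Int), Dom_checkAcceptable value part → Pre_checkAcceptable value part → Spec_checkAcceptable value part (checkAcceptable value part)

-- ===== LEMMAS AND PROOFS =====

-- ---- A-side loop shapes ----

-- A's part-1 loop: two monotone flags over one index list
theorem foldl_flags {α : Type} (l : List α) (p q : α → Prop) [DecidablePred p] [DecidablePred q]
    (a b : Bool) :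
    l.foldl (fun (st : Bool × Bool) x =>
      let st1 := if p x then (true, st.2) else st
      if q x then (st1.1, false) else st1) (a, b)
    = (a || l.any (fun x => decide (p x)), b && l.all (fun x => !(decide (q x)))) := by
  induction l generalizing a b with
  | nil => simp
  | cons x xs ih =>
    rw [List.foldl_cons]
    have hstep : (let st1 := if p x then (true, (a, b).2) else (a, b)
        if q x then (st1.1, false) else st1)
        = (a || decide (p x), b && !(decide (q x))) := by
      by_cases hp : p x <;> by_cases hq : q x <;> simp [hp, hq]
    rw [hstep, ih]
    simp [Bool.or_assoc, Bool.and_assoc]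

-- A's part-2 ascent loop
theorem foldl_asc {α : Type} (l : List α) (q : α → Prop) [DecidablePred q] (b : Bool) :
    l.foldl (fun (asc : Bool) x => if q x then false else asc) b
    = (b && l.all (fun x => !(decide (q x)))) := by
  induction l generalizing b with
  | nil => simp
  | cons x xs ih =>
    simp only [List.foldl_cons]
    by_cases hq : q x
    · rw [if_pos hq, ih]; simp [hq]
    · rw [if_neg hq, ih]; simp [hq]

-- A's part-2 twoNext loop
theorem foldl_or {α : Type} (l : List α) (p : α → Prop) [DecidablePred p] (a : Bool) :
    l.foldl (fun (two : Bool) x => if p x then true else two) a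
    = (a || l.any (fun x => decide (p x))) := by
  induction l generalizing a with
  | nil => simp
  | cons x xs ih =>
    simp only [List.foldl_cons]
    by_cases hp : p x
    · rw [if_pos hp, ih]; simp [hp]
    · rw [if_neg hp, ih]; simp [hp]

-- the index pairs A reads are exactly the consecutive pairs of the character list
theorem range_pairs_map (s : List Char) (d : Char) :
    (PySem.List.pyRange 0 ((s.length : Int) - 1) 1).map
      (fun i => (PySem.List.pyGetD s i d, PySem.List.pyGetD s (i + 1) d))
    = s.zip s.tail := by
  rw [PySem.List.pyRange_one, List.map_map]
  apply List.ext_getElem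
  · simp [List.length_zip]
  · intro k h1 h2
    have hk : k < s.length - 1 := by simp at h1; omega
    have hkl : k < s.length := by omega
    have hk1l : k + 1 < s.length := by omega
    simp only [List.getElem_map, List.getElem_range, Function.comp_apply,
      List.getElem_zip, List.getElem_tail, zero_add]
    have c1 : PySem.List.pyGetD s ((k : Int)) d = s.getD k d := PySem.List.pyGetD_natCast s k d
    have c2 : PySem.List.pyGetD s ((k : Int) + 1) d = s.getD (k + 1) d := by
      have t := PySem.List.pyGetD_natCast s (k + 1) d
      push_cast at t
      exact t
    rw [c1, c2]
    simp [List.getD_eq_getElem?_getD, hkl, hk1l]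

theorem if_tf (b : Bool) : (if b = true then true else false) = b := by
  cases b <;> simp

-- ---- consecutive-pair bookkeeping ----

def ascP (s : List Char) : Bool := (s.zip s.tail).all (fun p => decide (pyDigit p.1 ≤ pyDigit p.2))
def ascG (g : List (Char × Nat)) : Bool :=
  (g.zip g.tail).all (fun p => decide (pyDigit p.1.1 ≤ pyDigit p.2.1))

theorem drop_takeWhile_eq_dropWhile {α : Type} (p : α → Bool) (l : List α) :
    l.drop (l.takeWhile p).length = l.dropWhile p := by
  induction l with
  | nil => rfl
  | cons x l ih =>
    by_cases h : p x
    · simp [List.takeWhile_cons, List.dropWhile_cons, h, ih]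
    · simp [List.takeWhile_cons, List.dropWhile_cons, h]

theorem takeWhile_beq_replicate (c : Char) (l : List Char) :
    l.takeWhile (fun x => x == c) = List.replicate (l.takeWhile (fun x => x == c)).length c := by
  exact List.eq_replicate_of_mem (fun b hb => by simpa using List.mem_takeWhile_imp hb)

theorem pairs_cons_replicate (c : Char) (n : Nat) (t : List Char) :
    ((c :: (List.replicate n c ++ t)).zip (List.replicate n c ++ t))
      = List.replicate n (c, c) ++ ((c :: t).zip t) := by
  induction n with
  | zero => simp
  | succ n ih =>
    rw [List.replicate_succ]
    rw [List.replicate_succ (n := n) (a := (c, c)), List.cons_append, List.zip_cons_cons, ih,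
      List.cons_append]

theorem cons_decomp (c : Char) (rest : List Char) :
    rest = List.replicate (rest.takeWhile (fun x => x == c)).length c
      ++ rest.drop (rest.takeWhile (fun x => x == c)).length := by
  conv_lhs => rw [← List.takeWhile_append_dropWhile (p := fun x => x == c) (l := rest)]
  rw [drop_takeWhile_eq_dropWhile]
  congr 1
  exact takeWhile_beq_replicate c rest

theorem head_drop_ne (c : Char) (rest : List Char) (h : Char) (t : List Char)
    (he : rest.drop (rest.takeWhile (fun x => x == c)).length = h :: t) : (h == c) = false := by
  have hx := List.head?_dropWhile_not (fun x => x == c) rest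
  rw [← drop_takeWhile_eq_dropWhile, he] at hx
  simpa using hx

theorem map_zip_tail {α β : Type} (f : α → β) (l : List α) :
    (l.map f).zip (l.map f).tail = (l.zip l.tail).map (fun p => (f p.1, f p.2)) := by
  cases l with
  | nil => rfl
  | cons a t =>
    simp only [List.map_cons, List.tail_cons]
    rw [show f a :: List.map f t = List.map f (a :: t) from rfl, List.zip_map]
    simp [Prod.map]

theorem rleB_cons (c : Char) (rest : List Char) :
    rleB (c :: rest)
      = (c, (rest.takeWhile (fun x => x == c)).length + 1)
        :: rleB (rest.drop (rest.takeWhile (fun x => x == c)).length) := by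
  rw [rleB]

-- equivalence of the two ascent checks (all adjacent pairs vs adjacent group heads)
theorem asc_rle (s : List Char) : ascP s = ascG (rleB s) := by
  induction s using rleB.induct with
  | case1 => simp [ascP, ascG, rleB]
  | case2 c rest ih =>
    rw [rleB_cons]
    have hdec := cons_decomp c rest
    simp only [ascP, ascG, List.tail_cons]
    conv_lhs => rw [hdec, pairs_cons_replicate]
    rw [List.all_append]
    have hrep : (List.replicate (rest.takeWhile (fun x => x == c)).length (c, c)).all
        (fun p => decide (pyDigit p.1 ≤ pyDigit p.2)) = true := by
      simp [List.mem_replicate]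
    rw [hrep, Bool.true_and]
    cases hcase : rest.drop (rest.takeWhile (fun x => x == c)).length with
    | nil => simp [rleB]
    | cons h t =>
      rw [hcase] at ih
      rw [rleB_cons] at ih ⊢
      simp only [ascP, ascG, List.tail_cons, List.zip_cons_cons, List.all_cons] at ih ⊢
      rw [← ih]

-- an adjacent equal pair exists iff some run has length ≥ 2
theorem two1_rle (s : List Char) :
    ((s.zip s.tail).any (fun p => p.1 == p.2)) = (rleB s).any (fun p => decide (2 ≤ p.2)) := by
  induction s using rleB.induct with
  | case1 => simp [rleB]
  | case2 c rest ih =>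
    rw [rleB_cons]
    have hdec := cons_decomp c rest
    simp only [List.tail_cons]
    conv_lhs => rw [hdec, pairs_cons_replicate]
    rw [List.any_append, List.any_cons]
    have hrep : (List.replicate (rest.takeWhile (fun x => x == c)).length (c, c)).any
        (fun p => p.1 == p.2) = !((rest.takeWhile (fun x => x == c)).length == 0) := by
      cases (rest.takeWhile (fun x => x == c)).length <;> simp
    rw [hrep]
    cases hcase : rest.drop (rest.takeWhile (fun x => x == c)).length with
    | nil =>
      simp only [List.zip_nil_right, List.any_nil, Bool.or_false, rleB]
      cases (rest.takeWhile (fun x => x == c)).length <;> simp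
    | cons h t =>
      have hne : (h == c) = false := head_drop_ne c rest h t hcase
      rw [hcase] at ih
      simp only [List.zip_cons_cons, List.any_cons, List.tail_cons] at ih ⊢
      have hch : (c == h) = false := by
        rw [beq_eq_false_iff_ne] at hne ⊢
        exact fun hh => hne hh.symm
      rw [hch, ih]
      cases (rest.takeWhile (fun x => x == c)).length <;> simp [Bool.or_assoc]

-- ---- part 2: exactly-twice character iff exactly-2 run, on sorted digit strings ----

def digits10 : List Char := ['0', '1', '2', '3', '4', '5', '6', '7', '8', '9']

set_option maxRecDepth 4000 in
theorem digits_inj : ∀ a ∈ digits10, ∀ b ∈ digits10, pyDigit a = pyDigit b → a = b := by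
  intro a ha b hb h
  fin_cases ha <;> fin_cases hb <;> revert h <;> decide

theorem digitChar_mem (m : Nat) (hm : m < 10) : Nat.digitChar m ∈ digits10 := by
  interval_cases m <;> decide

theorem mem_toDigitsCore (fuel n : Nat) (ds : List Char) (c : Char)
    (h : c ∈ Nat.toDigitsCore 10 fuel n ds) : c ∈ ds ∨ c ∈ digits10 := by
  induction fuel generalizing n ds with
  | zero => exact Or.inl h
  | succ fuel ih =>
    rw [Nat.toDigitsCore] at h
    by_cases h0 : n / 10 = 0
    · rw [if_pos h0] at h
      rcases List.mem_cons.mp h with hc | hc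
      · exact Or.inr (hc ▸ digitChar_mem _ (Nat.mod_lt _ (by norm_num)))
      · exact Or.inl hc
    · rw [if_neg h0] at h
      rcases ih (n / 10) (Nat.digitChar (n % 10) :: ds) h with hc | hc
      · rcases List.mem_cons.mp hc with h1 | h1
        · exact Or.inr (h1 ▸ digitChar_mem _ (Nat.mod_lt _ (by norm_num)))
        · exact Or.inl h1
      · exact Or.inr hc

theorem toChars_digits (value : Int) (hv : 0 ≤ value) :
    ∀ c ∈ PySem.Int.toChars value, c ∈ digits10 := by
  intro c hc
  unfold PySem.Int.toChars at hc
  rw [if_neg (by omega)] at hc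
  rcases mem_toDigitsCore _ _ _ _ hc with h | h
  · exact absurd h (List.not_mem_nil)
  · exact h

theorem allPairs_iff_isChain (s : List Char) :
    ascP s = true ↔ List.IsChain (fun a b => pyDigit a ≤ pyDigit b) s := by
  induction s with
  | nil => simp [ascP]
  | cons a l ih =>
    cases l with
    | nil => simp [ascP]
    | cons b t =>
      rw [List.isChain_cons_cons, ← ih]
      simp [ascP]

theorem two2_rle (s : List Char)
    (hpw : List.Pairwise (fun a b => pyDigit a ≤ pyDigit b) s)
    (hinj : ∀ a ∈ s, ∀ b ∈ s, pyDigit a = pyDigit b → a = b) :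
    ((PySem.Set.ofList s).any (fun k => PySem.List.count s k == 2))
      = ((rleB s).any (fun p => p.2 == 2)) := by
  induction s using rleB.induct with
  | case1 => simp [rleB, PySem.Set.ofList]
  | case2 c rest ih =>
    rw [rleB_cons]
    have hdec := cons_decomp c rest
    -- notation
    have hpw' : (rest.drop (rest.takeWhile (fun x => x == c)).length).Pairwise
        (fun a b => pyDigit a ≤ pyDigit b) := by
      have h1 : (rest.drop (rest.takeWhile (fun x => x == c)).length).Sublist (c :: rest) := by
        refine List.Sublist.trans ?_ (List.sublist_cons_self c rest)
        conv_rhs => rw [hdec]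
        exact List.sublist_append_right _ _
      exact hpw.sublist h1
    have hmem_rest' : ∀ x, x ∈ rest.drop (rest.takeWhile (fun x => x == c)).length → x ∈ c :: rest := by
      intro x hx
      refine List.mem_cons_of_mem _ ?_
      rw [hdec]
      exact List.mem_append_right _ hx
    have hinj' : ∀ a ∈ rest.drop (rest.takeWhile (fun x => x == c)).length,
        ∀ b ∈ rest.drop (rest.takeWhile (fun x => x == c)).length, pyDigit a = pyDigit b → a = b :=
      fun a ha b hb => hinj a (hmem_rest' a ha) b (hmem_rest' b hb)
    have hIH := ih hpw' hinj'
    -- c does not occur after its own run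
    have hcnot : c ∉ rest.drop (rest.takeWhile (fun x => x == c)).length := by
      intro hmem
      cases hcase : rest.drop (rest.takeWhile (fun x => x == c)).length with
      | nil => rw [hcase] at hmem; exact absurd hmem (List.not_mem_nil)
      | cons h t =>
        have hne : (h == c) = false := head_drop_ne c rest h t hcase
        have hne' : h ≠ c := by rwa [beq_eq_false_iff_ne] at hne
        rw [hcase] at hmem
        rcases List.mem_cons.mp hmem with h1 | h1
        · exact hne' h1.symm
        · -- c strictly after h: pyDigit h ≤ pyDigit c and pyDigit c ≤ pyDigit h
          have hle1 : pyDigit h ≤ pyDigit c := by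
            rw [hcase] at hpw'
            exact (List.pairwise_cons.mp hpw').1 c h1
          have hle2 : pyDigit c ≤ pyDigit h := by
            have := (List.pairwise_cons.mp hpw).1
            refine this h ?_
            rw [hdec]
            refine List.mem_append_right _ ?_
            rw [hcase]; exact List.mem_cons_self
          have heq : pyDigit c = pyDigit h := le_antisymm hle2 hle1
          have hch : c = h := hinj c List.mem_cons_self h
            (hmem_rest' h (by rw [hcase]; exact List.mem_cons_self)) heq
          exact hne' hch.symm
    -- counts in s versus counts in the remainder
    have hcount_c : PySem.List.count (c :: rest) c
        = (rest.takeWhile (fun x => x == c)).length + 1 := by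
      rw [PySem.List.count_eq]
      conv_lhs => rw [hdec]
      rw [List.count_cons, List.count_append, List.count_replicate]
      simp [List.count_eq_zero.mpr hcnot]
    have hcount_k : ∀ k, k ≠ c → PySem.List.count (c :: rest) k
        = PySem.List.count (rest.drop (rest.takeWhile (fun x => x == c)).length) k := by
      intro k hk
      rw [PySem.List.count_eq, PySem.List.count_eq]
      conv_lhs => rw [hdec]
      rw [List.count_cons, List.count_append, List.count_replicate]
      simp [hk, Ne.symm hk]
    rw [Bool.eq_iff_iff]
    simp only [List.any_eq_true, PySem.Set.mem_ofList, beq_iff_eq]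
    rw [Bool.eq_iff_iff] at hIH
    simp only [List.any_eq_true, PySem.Set.mem_ofList, beq_iff_eq] at hIH
    constructor
    · rintro ⟨k, hk, hk2⟩
      by_cases hkc : k = c
      · subst hkc
        rw [hcount_c] at hk2
        exact ⟨(k, (rest.takeWhile (fun x => x == k)).length + 1), List.mem_cons_self, hk2⟩
      · have hkrest : k ∈ rest.drop (rest.takeWhile (fun x => x == c)).length := by
          rcases List.mem_cons.mp hk with h1 | h1
          · exact absurd h1 hkc
          · rw [hdec] at h1
            rcases List.mem_append.mp h1 with h2 | h2
            · exact absurd (List.eq_of_mem_replicate h2) hkc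
            · exact h2
        rw [hcount_k k hkc] at hk2
        rcases hIH.mp ⟨k, hkrest, hk2⟩ with ⟨p, hp, hp2⟩
        exact ⟨p, List.mem_cons_of_mem _ hp, hp2⟩
    · rintro ⟨p, hp, hp2⟩
      rcases List.mem_cons.mp hp with h1 | h1
      · refine ⟨c, List.mem_cons_self, ?_⟩
        rw [hcount_c]
        rw [h1] at hp2
        exact hp2
      · rcases hIH.mpr ⟨p, h1, hp2⟩ with ⟨k, hk, hk2⟩
        have hkc : k ≠ c := fun hh => hcnot (hh ▸ hk)
        exact ⟨k, hmem_rest' k hk, by rw [hcount_k k hkc]; exact hk2⟩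

-- any/all over A's index range, read as consecutive pairs
theorem pyRange_pairs_any (s : List Char) (d : Char) (q : Char × Char → Bool) :
    (PySem.List.pyRange 0 ((s.length : Int) - 1) 1).any
      (fun i => q (PySem.List.pyGetD s i d, PySem.List.pyGetD s (i + 1) d))
    = (s.zip s.tail).any q := by
  rw [← range_pairs_map s d, List.any_map]
  rfl

theorem pyRange_pairs_all (s : List Char) (d : Char) (q : Char × Char → Bool) :
    (PySem.List.pyRange 0 ((s.length : Int) - 1) 1).all
      (fun i => q (PySem.List.pyGetD s i d, PySem.List.pyGetD s (i + 1) d))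
    = (s.zip s.tail).all q := by
  rw [← range_pairs_map s d, List.all_map]
  rfl

-- B's ascent check on group heads, written the way the port writes it, is ascG
theorem heads_asc (g : List (Char × Nat)) :
    ((g.map (fun p => pyDigit p.1)).zip
        (PySem.List.slice (g.map (fun p => pyDigit p.1)) (some 1) none)).all
      (fun p => decide (p.1 ≤ p.2)) = ascG g := by
  rw [PySem.List.slice_from_one, map_zip_tail, List.all_map]
  rfl

-- A's ascent flag over consecutive pairs is ascP
theorem a_asc_eq (s : List Char) :
    ((s.zip s.tail).all (fun p => !(decide (pyDigit p.1 > pyDigit p.2)))) = ascP s := by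
  unfold ascP
  congr 1
  funext p
  by_cases h : pyDigit p.1 ≤ pyDigit p.2
  · simp [h, not_lt.mpr h]
  · simp [h, not_le.mp h]

-- ===== VERDICT (by name: the statement is the Claim_ definition above) =====
theorem checkAcceptable_spec : Claim_equal_checkAcceptable := by
  intro value part _ hpre
  unfold Spec_checkAcceptable checkAcceptable checkAcceptable_alt
  set s := PySem.Int.toChars value with hs
  by_cases h1 : part = 1
  · subst h1
    simp only [show ((1 : Int) == 1) = true from rfl, show ((1 : Int) == 2) = false from rfl,
      show ((1 : Int) != 1) = false from rfl, show ((1 : Int) != 2) = true from rfl,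
      Bool.false_and, Bool.false_eq_true, if_false, if_true, if_pos]
    rw [foldl_flags _ (fun i => (PySem.List.pyGetD s i ' ' == PySem.List.pyGetD s (i+1) ' ') = true)
          (fun i => pyDigit (PySem.List.pyGetD s i ' ') > pyDigit (PySem.List.pyGetD s (i+1) ' '))]
    rw [heads_asc]
    rw [if_tf]
    simp only [Bool.true_and, Bool.false_or]
    rw [pyRange_pairs_all s ' ' (fun p => !(decide (pyDigit p.1 > pyDigit p.2))),
      pyRange_pairs_any s ' ' (fun p => decide ((p.1 == p.2) = true))]
    rw [a_asc_eq, asc_rle, ← two1_rle]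
    congr 1
    congr 1
    funext p
    cases hb : p.1 == p.2 <;> simp [hb]
  · by_cases h2 : part = 2
    · subst h2
      simp only [show ((2 : Int) == 1) = false from rfl, show ((2 : Int) == 2) = true from rfl,
        show ((2 : Int) != 1) = true from rfl, show ((2 : Int) != 2) = false from rfl,
        Bool.and_false, Bool.false_eq_true, if_false, if_true, if_pos]
      rw [foldl_asc _ (fun i => pyDigit (PySem.List.pyGetD s i ' ') > pyDigit (PySem.List.pyGetD s (i+1) ' ')),
        foldl_or _ (fun val => (PySem.List.count s val == 2) = true)]
      rw [heads_asc]
      rw [if_tf]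
      simp only [Bool.true_and, Bool.false_or]
      rw [pyRange_pairs_all s ' ' (fun p => !(decide (pyDigit p.1 > pyDigit p.2)))]
      rw [a_asc_eq]
      have hset : (PySem.Set.ofList s).any (fun val => decide ((PySem.List.count s val == 2) = true))
          = (PySem.Set.ofList s).any (fun val => PySem.List.count s val == 2) := by
        congr 1
        funext val
        cases hb : PySem.List.count s val == 2 <;> simp [hb]
      rw [hset]
      by_cases ha : ascP s = true
      · have hv : 0 ≤ value := hpre (Or.inr rfl)
        have hchain := (allPairs_iff_isChain s).mp ha
        have hpw : s.Pairwise (fun a b => pyDigit a ≤ pyDigit b) := by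
          haveI : IsTrans Char (fun a b => pyDigit a ≤ pyDigit b) :=
            ⟨fun _ _ _ hab hbc => le_trans hab hbc⟩
          exact List.isChain_iff_pairwise.mp hchain
        have hinj : ∀ a ∈ s, ∀ b ∈ s, pyDigit a = pyDigit b → a = b :=
          fun a hA b hB => digits_inj a (toChars_digits value hv a (hs ▸ hA))
            b (toChars_digits value hv b (hs ▸ hB))
        have hag : ascG (rleB s) = true := by rw [← asc_rle]; exact ha
        rw [ha, hag, two2_rle s hpw hinj]
      · have ha' : ascP s = false := Bool.eq_false_iff.mpr ha
        have hag : ascG (rleB s) = false := by rw [← asc_rle]; exact ha'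
        rw [ha', hag]
        simp
    · simp only [show ∀ (x : Int), (x == 1) = decide (x = 1) from fun x => rfl,
        show ∀ (x : Int), (x == 2) = decide (x = 2) from fun x => rfl]
      simp [h1, h2]
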